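-- pv_equiv track=rewrite | github.com/tkdang97/AoC | 2022/Day 18.py | part2
-- ===== SOURCE A (Python) =====
-- def get_neighbors(x, y, z):
--     return (x - 1, y, z), (x + 1, y, z), (x, y - 1, z), (x, y + 1, z), (x, y, z - 1), (x, y, z + 1)
--
-- def part2(cubes):
--     min_x, min_y, min_z = map(lambda c: min(c) - 1, zip(*cubes))
--     max_x, max_y, max_z = map(lambda c: max(c) + 1, zip(*cubes))
--     water = set()
--     lava = set(cubes)
--     curr = {(min_x, min_y, min_z)}
--     total = 0
--     while curr:
--         nxt = set()
--         for cube in curr: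
--             water.add(cube)
--             for x, y, z in get_neighbors(*cube):
--                 if (x, y, z) in lava:
--                     total += 1
--                 elif min_x <= x <= max_x and min_y <= y <= max_y and min_z <= z <= max_z and (x, y, z) not in water:
--                     nxt.add((x, y, z))
--         curr = nxt
--     return total
-- ===== SOURCE B (Python) =====
-- def get_neighbors(x, y, z):
--     return (x - 1, y, z), (x + 1, y, z), (x, y - 1, z), (x, y + 1, z), (x, y, z - 1), (x, y, z + 1)
--
-- def part2(cubes):
--     lava = set(cubes)
--     min_x, min_y, min_z = (min(c) - 1 for c in zip(*cubes))
--     max_x, max_y, max_z = (max(c) + 1 for c in zip(*cubes))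
--     exterior = set()
--     stack = [(min_x, min_y, min_z)]
--     while stack:
--         p = stack.pop()
--         if p in exterior:
--             continue
--         exterior.add(p)
--         x, y, z = p
--         for n in ((x - 1, y, z), (x + 1, y, z), (x, y - 1, z),
--                   (x, y + 1, z), (x, y, z - 1), (x, y, z + 1)):
--             nx, ny, nz = n
--             if (min_x <= nx <= max_x and min_y <= ny <= max_y
--                     and min_z <= nz <= max_z and n not in lava and n not in exterior):
--                 stack.append(n)
--     return sum(1 for c in lava for n in get_neighbors(*c) if n in exterior)
-- ===== Notes on version B (the rewrite author's own statement) =====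
-- stated objective: simpler
-- what changed: A's single BFS interleaves face counting with the flood fill (counting lava faces while expanding a frontier set); B separates concerns: a stack-based DFS flood fill first collects only the exterior air cells, then an independent second pass iterates over the lava cubes and counts their neighbors that lie in the exterior set.
-- outside the precondition, e.g. on part2([]): A raises ValueError, B raises ValueError
import Mathlib
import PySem

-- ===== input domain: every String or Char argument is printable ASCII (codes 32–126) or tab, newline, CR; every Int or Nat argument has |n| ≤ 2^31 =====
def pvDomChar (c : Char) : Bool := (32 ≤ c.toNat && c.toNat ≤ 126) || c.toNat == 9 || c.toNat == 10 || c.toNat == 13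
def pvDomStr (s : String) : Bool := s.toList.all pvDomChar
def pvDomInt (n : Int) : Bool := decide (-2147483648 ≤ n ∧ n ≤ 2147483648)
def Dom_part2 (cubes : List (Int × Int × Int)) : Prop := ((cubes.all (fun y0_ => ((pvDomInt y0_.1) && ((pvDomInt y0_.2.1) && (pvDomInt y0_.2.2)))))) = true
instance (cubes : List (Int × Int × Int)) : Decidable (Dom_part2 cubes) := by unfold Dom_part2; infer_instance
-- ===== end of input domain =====

-- B replaces A's single BFS that interleaves face counting with the flood fill by two separate
-- passes: a stack-based (DFS) flood fill that only collects the exterior air cells, then an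
-- independent counting pass over the lava cubes (objective: simpler decomposition, same cost).

abbrev C3 := Int × Int × Int

-- shared helper: Python's get_neighbors (defined identically in both sources)
def getNeighbors (c : Int × Int × Int) : List (Int × Int × Int) :=
  [(c.1 - 1, c.2.1, c.2.2), (c.1 + 1, c.2.1, c.2.2),
   (c.1, c.2.1 - 1, c.2.2), (c.1, c.2.1 + 1, c.2.2),
   (c.1, c.2.1, c.2.2 - 1), (c.1, c.2.1, c.2.2 + 1)]

-- shared helper: the bounding-box test min_i <= n_i <= max_i (written identically in both sources)
def inBox (lo hi n : Int × Int × Int) : Bool :=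
  decide (lo.1 ≤ n.1 ∧ n.1 ≤ hi.1 ∧ lo.2.1 ≤ n.2.1 ∧ n.2.1 ≤ hi.2.1 ∧
          lo.2.2 ≤ n.2.2 ∧ n.2.2 ≤ hi.2.2)

-- shared helper: Python's min(xs) / max(xs) on the (nonempty, under Pre_) coordinate lists
def pyMinInt (xs : List Int) : Int := (PySem.List.min? xs (fun v => v)).getD 0
def pyMaxInt (xs : List Int) : Int := (PySem.List.max? xs (fun v => v)).getD 0

def loBound (cubes : List (Int × Int × Int)) : Int × Int × Int :=
  (pyMinInt (cubes.map (·.1)) - 1, pyMinInt (cubes.map (·.2.1)) - 1,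
   pyMinInt (cubes.map (·.2.2)) - 1)

def hiBound (cubes : List (Int × Int × Int)) : Int × Int × Int :=
  (pyMaxInt (cubes.map (·.1)) + 1, pyMaxInt (cubes.map (·.2.1)) + 1,
   pyMaxInt (cubes.map (·.2.2)) + 1)

-- fuel bound (a totalization device only: number of cells of the bounding box)
def boxFuel (lo hi : Int × Int × Int) : Nat :=
  ((hi.1 - lo.1 + 1) * (hi.2.1 - lo.2.1 + 1) * (hi.2.2 - lo.2.2 + 1)).toNat

-- ===== PORT A =====
-- body of A's 'for cube in curr' loop: add cube to water, then scan its 6 neighbors,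
-- counting lava faces into total and collecting fresh in-box air cells into nxt
-- one neighbor of A's inner 'for x, y, z in get_neighbors(*cube)' loop
def innA (lava : PySem.Set C3) (lo hi : C3) (water : Std.HashSet C3)
    (tn : Int × PySem.Set C3) (n : C3) : Int × PySem.Set C3 :=
  if PySem.Set.contains lava n then (tn.1 + 1, tn.2)
  else if inBox lo hi n && !(water.contains n) then (tn.1, PySem.Set.add tn.2 n)
  else tn

def stepA (lava : PySem.Set (Int × Int × Int)) (lo hi : Int × Int × Int)
    (st : Std.HashSet (Int × Int × Int) × Int × PySem.Set (Int × Int × Int))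
    (cube : Int × Int × Int) :
    Std.HashSet (Int × Int × Int) × Int × PySem.Set (Int × Int × Int) :=
  let water := st.1.insert cube
  let r := (getNeighbors cube).foldl (innA lava lo hi water) (st.2.1, st.2.2)
  (water, r.1, r.2)

-- A's 'while curr:' loop (fuel only totalizes; the loop exits via curr = [])
def loopA (lava : PySem.Set (Int × Int × Int)) (lo hi : Int × Int × Int) :
    Nat → Std.HashSet (Int × Int × Int) → PySem.Set (Int × Int × Int) → Int → Int
  | 0, _, _, total => total
  | fuel + 1, water, curr, total =>
    match curr with
    | [] => total
    | _ :: _ =>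
      let st := curr.foldl (stepA lava lo hi) (water, total, PySem.Set.empty)
      loopA lava lo hi fuel st.1 st.2.2 st.2.1

def part2 (cubes : List (Int × Int × Int)) : Int :=
  match cubes with
  | [] => 0  -- Python raises ValueError here (unpacking an empty zip); excluded by Pre_part2
  | _ :: _ =>
    loopA (PySem.Set.ofList cubes) (loBound cubes) (hiBound cubes)
      (boxFuel (loBound cubes) (hiBound cubes) + 1)
      ∅ [loBound cubes] 0

-- ===== PORT B =====
-- push the unvisited in-box air neighbors of p onto the stack
def pushB (lava : PySem.Set (Int × Int × Int)) (lo hi : Int × Int × Int)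
    (ext : Std.HashSet (Int × Int × Int)) (stack : List (Int × Int × Int))
    (p : Int × Int × Int) : List (Int × Int × Int) :=
  (getNeighbors p).foldl
    (fun s n =>
      if inBox lo hi n && !(PySem.Set.contains lava n) && !(ext.contains n)
      then n :: s else s)
    stack

-- B's 'while stack:' flood fill collecting only the exterior air cells
-- (the stack top is the list head; fuel only totalizes, the loop exits via stack = [])
def loopB (lava : PySem.Set (Int × Int × Int)) (lo hi : Int × Int × Int) :
    Nat → Std.HashSet (Int × Int × Int) → List (Int × Int × Int) →
    Std.HashSet (Int × Int × Int)
  | 0, ext, _ => ext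
  | fuel + 1, ext, stack =>
    match stack with
    | [] => ext
    | p :: rest =>
      if ext.contains p then loopB lava lo hi fuel ext rest
      else
        let ext' := ext.insert p
        loopB lava lo hi fuel ext' (pushB lava lo hi ext' rest p)

-- B's separate counting pass: sum(1 for c in lava for n in get_neighbors(*c) if n in exterior)
def countFaces (lava : PySem.Set (Int × Int × Int))
    (ext : Std.HashSet (Int × Int × Int)) : Int :=
  lava.foldl
    (fun acc c =>
      acc + (((getNeighbors c).filter (fun n => ext.contains n)).length : Int))
    0

def part2_alt (cubes : List (Int × Int × Int)) : Int :=
  match cubes with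
  | [] => 0  -- Python raises ValueError here (min of an empty sequence); excluded by Pre_part2
  | _ :: _ =>
    countFaces (PySem.Set.ofList cubes)
      (loopB (PySem.Set.ofList cubes) (loBound cubes) (hiBound cubes)
        (7 * boxFuel (loBound cubes) (hiBound cubes) + 2)
        ∅ [loBound cubes])

-- ===== PRECONDITION & SPEC =====
-- Pre_ excludes only the empty list, on which Python A raises ValueError (unpacking map over an empty zip).
def Pre_part2 (cubes : List (Int × Int × Int)) : Prop := cubes ≠ []
instance (cubes : List (Int × Int × Int)) : Decidable (Pre_part2 cubes) := by
  unfold Pre_part2; infer_instance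

def pvWitness_part2 : (List (Int × Int × Int)) := [(1, 1, 1), (2, 1, 1)]

def Spec_part2 (cubes : List (Int × Int × Int)) (out : Int) : Prop := out = part2_alt cubes
instance (cubes : List (Int × Int × Int)) (out : Int) : Decidable (Spec_part2 cubes out) := by
  unfold Spec_part2; infer_instance

-- ===== CLAIM (what is proved, stated in full; the proofs are below) =====
def Claim_equal_part2 : Prop := ∀ (cubes : List (Int × Int × Int)), Dom_part2 cubes → Pre_part2 cubes → Spec_part2 cubes (part2 cubes)

-- ===== LEMMAS AND PROOFS =====

-- the six axis directions; getNeighbors c is the shifts of c by these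
def dirs : List (Int × Int × Int) :=
  [(-1, 0, 0), (1, 0, 0), (0, -1, 0), (0, 1, 0), (0, 0, -1), (0, 0, 1)]

def shift (d c : Int × Int × Int) : Int × Int × Int :=
  (c.1 + d.1, c.2.1 + d.2.1, c.2.2 + d.2.2)

def dneg (d : Int × Int × Int) : Int × Int × Int := (-d.1, -d.2.1, -d.2.2)

-- a cell is good if it is inside the box and not lava
def Good (lava : List (Int × Int × Int)) (lo hi n : Int × Int × Int) : Prop :=
  inBox lo hi n = true ∧ n ∉ lava

-- exterior reachability from the corner lo through good cells
inductive Reach (lava : List (Int × Int × Int)) (lo hi : Int × Int × Int) :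
    (Int × Int × Int) → Prop
  | base : Reach lava lo hi lo
  | step {c n} : Reach lava lo hi c → n ∈ getNeighbors c → Good lava lo hi n →
      Reach lava lo hi n

def par (c : Int × Int × Int) : Bool := decide ((c.1 + c.2.1 + c.2.2) % 2 = 0)

noncomputable def boxF (lo hi : Int × Int × Int) : Finset (Int × Int × Int) :=
  (Finset.Icc lo.1 hi.1) ×ˢ ((Finset.Icc lo.2.1 hi.2.1) ×ˢ (Finset.Icc lo.2.2 hi.2.2))

def totalOf (lava W : List (Int × Int × Int)) : Int :=
  (W.map (fun c => ((getNeighbors c).countP (fun n => PySem.Set.contains lava n) : Int))).sum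

lemma mem_boxF {lo hi x : C3} : x ∈ boxF lo hi ↔ inBox lo hi x = true := by
  simp [boxF, inBox, Finset.mem_product]; tauto

lemma card_boxF (lo hi : C3) (h1 : lo.1 ≤ hi.1) (h2 : lo.2.1 ≤ hi.2.1) (h3 : lo.2.2 ≤ hi.2.2) :
    (boxF lo hi).card = boxFuel lo hi := by
  have e : ∀ a b : Int, a ≤ b → b - a + 1 = ((b + 1 - a).toNat : Int) := by
    intro a b h; omega
  simp only [boxF, Finset.card_product, Int.card_Icc, boxFuel]
  rw [e _ _ h1, e _ _ h2, e _ _ h3, ← Nat.cast_mul, ← Nat.cast_mul, Int.toNat_natCast,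
    Nat.mul_assoc]

lemma length_le_boxFuel {lo hi : C3} {W : List C3}
    (h1 : lo.1 ≤ hi.1) (h2 : lo.2.1 ≤ hi.2.1) (h3 : lo.2.2 ≤ hi.2.2)
    (hN : W.Nodup) (hbox : ∀ c ∈ W, inBox lo hi c = true) :
    W.length ≤ boxFuel lo hi := by
  rw [← card_boxF lo hi h1 h2 h3, ← List.toFinset_card_of_nodup hN]
  exact Finset.card_le_card (fun x hx => mem_boxF.2 (hbox x (List.mem_toFinset.1 hx)))

lemma par_neighbor {c n : C3} (h : n ∈ getNeighbors c) : par n = !par c := by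
  obtain ⟨x, y, z⟩ := c
  simp [getNeighbors] at h
  rcases h with h | h | h | h | h | h <;> subst h <;>
    simp [par, decide_eq_decide, Bool.eq_not_iff] <;> omega


-- closure induction: any neighbor-closed set containing lo contains every reachable cell
lemma reach_subset_closed {lava : List C3} {lo hi : C3} {W : List C3}
    (hlo : lo ∈ W)
    (hcl : ∀ c ∈ W, ∀ n ∈ getNeighbors c, Good lava lo hi n → n ∈ W) :
    ∀ x, Reach lava lo hi x → x ∈ W := by
  intro x hx
  induction hx with
  | base => exact hlo
  | step hr hn hg ih => exact hcl _ ih _ hn hg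

-- A's inner loop over the six neighbors of one processed cube
lemma innerA (lava : PySem.Set C3) (lo hi : C3) (water : Std.HashSet C3) (ns : List C3) :
    ∀ (t : Int) (nx : PySem.Set C3), nx.Nodup →
    (ns.foldl (innA lava lo hi water) (t, nx)).1
        = t + (ns.countP (fun n => PySem.Set.contains lava n) : Int) ∧
    (ns.foldl (innA lava lo hi water) (t, nx)).2.Nodup ∧
    (∀ x ∈ nx, x ∈ (ns.foldl (innA lava lo hi water) (t, nx)).2) ∧
    (∀ x ∈ (ns.foldl (innA lava lo hi water) (t, nx)).2,
        x ∈ nx ∨ (inBox lo hi x = true ∧ x ∉ lava ∧ x ∉ water ∧ x ∈ ns)) ∧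
    (∀ n ∈ ns, inBox lo hi n = true → n ∉ lava →
        n ∈ water ∨ n ∈ (ns.foldl (innA lava lo hi water) (t, nx)).2) := by
  induction ns with
  | nil => intro t nx hnx; simpa using hnx
  | cons n ns ih =>
    intro t nx hnx
    by_cases hlava : PySem.Set.contains lava n = true
    · have hmem : n ∈ lava := (PySem.Set.contains_iff _ _).1 hlava
      obtain ⟨i1, i2, i3, i4, i5⟩ := ih (t + 1) nx hnx
      have hred : (n :: ns).foldl (innA lava lo hi water) (t, nx)
          = ns.foldl (innA lava lo hi water) (t + 1, nx) := by
        simp [innA, hlava, hmem]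
      rw [hred]
      refine ⟨?_, i2, i3, ?_, ?_⟩
      · rw [i1, List.countP_cons]; simp [hmem]; push_cast; ring
      · intro x hx
        rcases i4 x hx with h | h
        · exact Or.inl h
        · exact Or.inr ⟨h.1, h.2.1, h.2.2.1, List.mem_cons_of_mem _ h.2.2.2⟩
      · intro m hm hbox hml
        rcases List.mem_cons.1 hm with rfl | hm'
        · exact absurd hmem hml
        · exact i5 m hm' hbox hml
    · rw [Bool.not_eq_true] at hlava
      have hnl : n ∉ lava := fun h => by
        rw [(PySem.Set.contains_iff _ _).2 h] at hlava; cases hlava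
      by_cases hcond : (inBox lo hi n && !(water.contains n)) = true
      · have hbox : inBox lo hi n = true := (Bool.and_eq_true_iff.1 hcond).1
        have hnw : n ∉ water := by
          have h2 := (Bool.and_eq_true_iff.1 hcond).2
          rw [Bool.not_eq_true'] at h2
          intro h; rw [Std.HashSet.mem_iff_contains, h2] at h; cases h
        obtain ⟨i1, i2, i3, i4, i5⟩ := ih t (PySem.Set.add nx n) (PySem.Set.nodup_add _ _ hnx)
        have hred : (n :: ns).foldl (innA lava lo hi water) (t, nx)
            = ns.foldl (innA lava lo hi water) (t, PySem.Set.add nx n) := by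
          simp [innA, hnl, hbox, hnw]
        rw [hred]
        refine ⟨?_, i2, ?_, ?_, ?_⟩
        · rw [i1, List.countP_cons]; simp [hnl]
        · intro x hx
          exact i3 x ((PySem.Set.mem_add _ _ _).2 (Or.inl hx))
        · intro x hx
          rcases i4 x hx with h | h
          · rcases (PySem.Set.mem_add _ _ _).1 h with h' | h'
            · exact Or.inl h'
            · subst h'
              exact Or.inr ⟨hbox, hnl, hnw, List.mem_cons_self ..⟩
          · exact Or.inr ⟨h.1, h.2.1, h.2.2.1, List.mem_cons_of_mem _ h.2.2.2⟩
        · intro m hm hmbox hml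
          rcases List.mem_cons.1 hm with rfl | hm'
          · exact Or.inr (i3 m ((PySem.Set.mem_add _ _ _).2 (Or.inr rfl)))
          · exact i5 m hm' hmbox hml
      · have hw : n ∈ water ∨ inBox lo hi n = false := by
          by_cases hb : inBox lo hi n = true
          · have h' : water.contains n = true := by
              cases hcw : water.contains n
              · exact absurd (by rw [hb, hcw]; rfl) hcond
              · rfl
            exact Or.inl (Std.HashSet.mem_iff_contains.2 h')
          · exact Or.inr (by simpa using hb)
        obtain ⟨i1, i2, i3, i4, i5⟩ := ih t nx hnx
        have hred : (n :: ns).foldl (innA lava lo hi water) (t, nx)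
            = ns.foldl (innA lava lo hi water) (t, nx) := by
          rcases hw with h | h
          · simp [innA, hnl, h]
          · simp [innA, hnl, h]
        rw [hred]
        refine ⟨?_, i2, i3, ?_, ?_⟩
        · rw [i1, List.countP_cons]; simp [hnl]
        · intro x hx
          rcases i4 x hx with h | h
          · exact Or.inl h
          · exact Or.inr ⟨h.1, h.2.1, h.2.2.1, List.mem_cons_of_mem _ h.2.2.2⟩
        · intro m hm hmbox hml
          rcases List.mem_cons.1 hm with rfl | hm'
          · rcases hw with h | h
            · exact Or.inl h
            · rw [hmbox] at h; cases h
          · exact i5 m hm' hmbox hml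

lemma totalOf_append (lava A B : List C3) :
    totalOf lava (A ++ B) = totalOf lava A + totalOf lava B := by
  simp [totalOf]

lemma totalOf_cons (lava : List C3) (c : C3) (l : List C3) :
    totalOf lava (c :: l)
      = ((getNeighbors c).countP (fun n => PySem.Set.contains lava n) : Int) + totalOf lava l := by
  simp [totalOf]

-- A's 'for cube in curr' level: water gains exactly the cells of curr,
-- total gains their lava-face counts, nxt collects fresh good neighbors
lemma foldA (lava : PySem.Set C3) (lo hi : C3) (l : List C3) :
    ∀ (water : Std.HashSet C3) (nxt : PySem.Set C3) (total : Int), nxt.Nodup → l.Nodup →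
    (∀ c ∈ l, c ∉ water) →
    (∀ x, x ∈ (l.foldl (stepA lava lo hi) (water, total, nxt)).1 ↔ x ∈ water ∨ x ∈ l) ∧
    (l.foldl (stepA lava lo hi) (water, total, nxt)).2.1 = total + totalOf lava l ∧
    (l.foldl (stepA lava lo hi) (water, total, nxt)).2.2.Nodup ∧
    (∀ x ∈ nxt, x ∈ (l.foldl (stepA lava lo hi) (water, total, nxt)).2.2) ∧
    (∀ x ∈ (l.foldl (stepA lava lo hi) (water, total, nxt)).2.2,
        x ∈ nxt ∨ (inBox lo hi x = true ∧ x ∉ lava ∧ x ∉ water ∧ ∃ c ∈ l, x ∈ getNeighbors c)) ∧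
    (∀ c ∈ l, ∀ n ∈ getNeighbors c, inBox lo hi n = true → n ∉ lava →
        n ∈ (l.foldl (stepA lava lo hi) (water, total, nxt)).1 ∨
        n ∈ (l.foldl (stepA lava lo hi) (water, total, nxt)).2.2) := by
  induction l with
  | nil =>
    intro water nxt total hn hl hdisj
    exact ⟨by simp, by simp [totalOf], hn, fun x hx => hx, fun x hx => Or.inl hx, by simp⟩
  | cons c l ih =>
    intro water nxt total hn hl hdisj
    have hcw : c ∉ water := hdisj c (List.mem_cons_self ..)
    have hmemins : ∀ x : C3, x ∈ water.insert c ↔ x = c ∨ x ∈ water := by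
      intro x
      rw [Std.HashSet.mem_insert, beq_iff_eq]
      exact or_congr_left eq_comm
    have hstep : stepA lava lo hi (water, total, nxt) c
        = (water.insert c,
           ((getNeighbors c).foldl (innA lava lo hi (water.insert c)) (total, nxt)).1,
           ((getNeighbors c).foldl (innA lava lo hi (water.insert c)) (total, nxt)).2) := by
      simp [stepA]
    obtain ⟨j1, j2, j3, j4, j5⟩ := innerA lava lo hi (water.insert c) (getNeighbors c) total nxt hn
    have hcl : c ∉ l := (List.nodup_cons.1 hl).1
    have hl' : l.Nodup := (List.nodup_cons.1 hl).2
    have hdisj' : ∀ c' ∈ l, c' ∉ water.insert c := by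
      intro c' hc' hmem
      rcases (hmemins c').1 hmem with rfl | h
      · exact hcl hc'
      · exact hdisj c' (List.mem_cons_of_mem _ hc') h
    obtain ⟨k1, k2, k3, k4, k5, k6⟩ := ih (water.insert c)
      ((getNeighbors c).foldl (innA lava lo hi (water.insert c)) (total, nxt)).2
      ((getNeighbors c).foldl (innA lava lo hi (water.insert c)) (total, nxt)).1
      j2 hl' hdisj'
    have hred : (c :: l).foldl (stepA lava lo hi) (water, total, nxt)
        = l.foldl (stepA lava lo hi)
            (water.insert c,
             ((getNeighbors c).foldl (innA lava lo hi (water.insert c)) (total, nxt)).1,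
             ((getNeighbors c).foldl (innA lava lo hi (water.insert c)) (total, nxt)).2) := by
      rw [List.foldl_cons, hstep]
    rw [hred]
    refine ⟨?_, ?_, k3, ?_, ?_, ?_⟩
    · intro x
      rw [k1 x, hmemins x, List.mem_cons]
      tauto
    · rw [k2, j1, totalOf_cons]; ring
    · intro x hx
      exact k4 x (j3 x hx)
    · intro x hx
      rcases k5 x hx with h | h
      · rcases j4 x h with h' | h'
        · exact Or.inl h'
        · refine Or.inr ⟨h'.1, h'.2.1, ?_, c, List.mem_cons_self .., h'.2.2.2⟩
          intro hxw; exact h'.2.2.1 ((hmemins x).2 (Or.inr hxw))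
      · refine Or.inr ⟨h.1, h.2.1, ?_, ?_⟩
        · intro hxw; exact h.2.2.1 ((hmemins x).2 (Or.inr hxw))
        · obtain ⟨c', hc', hn'⟩ := h.2.2.2
          exact ⟨c', List.mem_cons_of_mem _ hc', hn'⟩
    · intro c' hc' n hn' hbox hnl
      rcases List.mem_cons.1 hc' with rfl | hc''
      · rcases j5 n hn' hbox hnl with h | h
        · exact Or.inl ((k1 n).2 (Or.inl h))
        · exact Or.inr (k4 n h)
      · exact k6 c' hc'' n hn' hbox hnl

lemma loopA_nil (lava : PySem.Set C3) (lo hi : C3) (fuel : Nat)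
    (water : Std.HashSet C3) (total : Int) :
    loopA lava lo hi (fuel + 1) water [] total = total := rfl

lemma loopA_cons (lava : PySem.Set C3) (lo hi : C3) (fuel : Nat)
    (water : Std.HashSet C3) (c : C3) (cs : List C3) (total : Int) :
    loopA lava lo hi (fuel + 1) water (c :: cs) total
      = loopA lava lo hi fuel
          ((c :: cs).foldl (stepA lava lo hi) (water, total, PySem.Set.empty)).1
          ((c :: cs).foldl (stepA lava lo hi) (water, total, PySem.Set.empty)).2.2
          ((c :: cs).foldl (stepA lava lo hi) (water, total, PySem.Set.empty)).2.1 := rfl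

-- the BFS loop of A computes totalOf over (a listing of) the reachable set
-- (Wl is a ghost listing of the members of the hash set water)
lemma loopA_spec (lava : PySem.Set C3) (lo hi : C3)
    (h1 : lo.1 ≤ hi.1) (h2 : lo.2.1 ≤ hi.2.1) (h3 : lo.2.2 ≤ hi.2.2) :
    ∀ (fuel : Nat) (water : Std.HashSet C3) (Wl : List C3) (curr : PySem.Set C3)
      (total : Int) (b : Bool),
    (∀ x, x ∈ water ↔ x ∈ Wl) → Wl.Nodup → curr.Nodup →
    (∀ c ∈ curr, c ∉ water) →
    (∀ c ∈ curr, par c = b) →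
    (∀ c ∈ Wl, inBox lo hi c = true) →
    (∀ c ∈ curr, inBox lo hi c = true) →
    (∀ c ∈ Wl, Reach lava lo hi c) →
    (∀ c ∈ curr, Reach lava lo hi c) →
    (∀ c ∈ Wl, ∀ n ∈ getNeighbors c, Good lava lo hi n → n ∈ Wl ∨ n ∈ curr) →
    (lo ∈ Wl ∨ lo ∈ curr) →
    total = totalOf lava Wl →
    boxFuel lo hi + 1 ≤ fuel + Wl.length →
    ∃ W : List C3, W.Nodup ∧ (∀ x, x ∈ W ↔ Reach lava lo hi x) ∧
      loopA lava lo hi fuel water curr total = totalOf lava W := by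
  intro fuel
  induction fuel with
  | zero =>
    intro water Wl curr total b hcompat hwN hcN hdisj hpar hwbox hcbox hwR hcR hclosed hlo htot hfuel
    exfalso
    have := length_le_boxFuel h1 h2 h3 hwN hwbox
    omega
  | succ fuel ih =>
    intro water Wl curr total b hcompat hwN hcN hdisj hpar hwbox hcbox hwR hcR hclosed hlo htot hfuel
    cases curr with
    | nil =>
      refine ⟨Wl, hwN, fun x => ⟨fun h => hwR x h, reach_subset_closed ?_ ?_ x⟩, ?_⟩
      · rcases hlo with h | h
        · exact h
        · cases h
      · intro c hc n hn hg
        rcases hclosed c hc n hn hg with h | h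
        · exact h
        · cases h
      · rw [loopA_nil, htot]
    | cons c cs =>
      have hemp : (PySem.Set.empty : PySem.Set C3).Nodup := List.nodup_nil
      obtain ⟨f1, f2, f3, f4, f5, f6⟩ :=
        foldA lava lo hi (c :: cs) water PySem.Set.empty total hemp hcN hdisj
      have hprov : ∀ x ∈ ((c :: cs).foldl (stepA lava lo hi) (water, total, PySem.Set.empty)).2.2,
          inBox lo hi x = true ∧ x ∉ lava ∧ x ∉ water ∧ ∃ c' ∈ c :: cs, x ∈ getNeighbors c' := by
        intro x hx
        rcases f5 x hx with h | h
        · cases h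
        · exact h
      have hxpar : ∀ x ∈ ((c :: cs).foldl (stepA lava lo hi) (water, total, PySem.Set.empty)).2.2,
          par x = !b := by
        intro x hx
        obtain ⟨_, _, _, c', hc', hn'⟩ := hprov x hx
        rw [par_neighbor hn', hpar c' hc']
      have hdisjW : List.Disjoint Wl (c :: cs) := by
        rw [List.disjoint_right]
        intro a ha hmem
        exact hdisj a ha ((hcompat a).2 hmem)
      obtain ⟨W, hW1, hW2, hW3⟩ := ih
        ((c :: cs).foldl (stepA lava lo hi) (water, total, PySem.Set.empty)).1
        (Wl ++ c :: cs)
        ((c :: cs).foldl (stepA lava lo hi) (water, total, PySem.Set.empty)).2.2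
        ((c :: cs).foldl (stepA lava lo hi) (water, total, PySem.Set.empty)).2.1
        (!b)
        (by
          intro x
          rw [f1 x, List.mem_append, hcompat x])
        (hwN.append hcN hdisjW)
        f3
        (by
          intro x hx
          obtain ⟨_, _, hxw, c', hc', hn'⟩ := hprov x hx
          intro hmem
          rcases (f1 x).1 hmem with h | h
          · exact hxw h
          · have hbb : (!b) = b := by rw [← hxpar x hx, hpar x h]
            exact Bool.not_ne_self b hbb)
        (hxpar)
        (by
          intro x hx
          rcases List.mem_append.1 hx with h | h
          · exact hwbox x h
          · exact hcbox x h)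
        (fun x hx => (hprov x hx).1)
        (by
          intro x hx
          rcases List.mem_append.1 hx with h | h
          · exact hwR x h
          · exact hcR x h)
        (by
          intro x hx
          obtain ⟨hb, hl', _, c', hc', hn'⟩ := hprov x hx
          exact Reach.step (hcR c' hc') hn' ⟨hb, hl'⟩)
        (by
          intro x hx n hn hg
          rcases List.mem_append.1 hx with h | h
          · rcases hclosed x h n hn hg with h' | h'
            · exact Or.inl (List.mem_append.2 (Or.inl h'))
            · exact Or.inl (List.mem_append.2 (Or.inr h'))
          · rcases f6 x h n hn hg.1 hg.2 with h' | h'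
            · rcases (f1 n).1 h' with h'' | h''
              · exact Or.inl (List.mem_append.2 (Or.inl ((hcompat n).1 h'')))
              · exact Or.inl (List.mem_append.2 (Or.inr h''))
            · exact Or.inr h')
        (by
          rcases hlo with h | h
          · exact Or.inl (List.mem_append.2 (Or.inl h))
          · exact Or.inl (List.mem_append.2 (Or.inr h)))
        (by rw [f2, totalOf_append, htot])
        (by
          rw [List.length_append]
          simp only [List.length_cons] at hfuel ⊢
          omega)
      refine ⟨W, hW1, hW2, ?_⟩
      rw [← hW3, loopA_cons]

lemma foldl_push {α : Type} (Q : α → Bool) (ns : List α) :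
    ∀ stack : List α,
    (ns.foldl (fun s n => if Q n then n :: s else s) stack).length ≤ stack.length + ns.length ∧
    (∀ x, x ∈ ns.foldl (fun s n => if Q n then n :: s else s) stack ↔
        x ∈ stack ∨ (x ∈ ns ∧ Q x = true)) := by
  induction ns with
  | nil => intro stack; simp
  | cons n ns ih =>
    intro stack
    obtain ⟨ihl, ihm⟩ := ih (if Q n then n :: stack else stack)
    constructor
    · refine le_trans ihl ?_
      by_cases h : Q n = true <;> simp [h] <;> omega
    · intro x
      rw [List.foldl_cons, ihm]
      by_cases h : Q n = true
      · simp only [h, if_true, List.mem_cons]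
        constructor
        · rintro ((rfl | h') | h') <;> simp_all
        · rintro (h' | ⟨(rfl | h'), hq⟩) <;> simp_all
      · simp only [h, if_false, List.mem_cons]
        constructor
        · rintro (h' | h') <;> simp_all
        · rintro (h' | ⟨(rfl | h'), hq⟩) <;> simp_all

lemma pushB_spec (lava : PySem.Set C3) (lo hi : C3) (ext : Std.HashSet C3)
    (stack : List C3) (p : C3) :
    (pushB lava lo hi ext stack p).length ≤ stack.length + 6 ∧
    (∀ x, x ∈ pushB lava lo hi ext stack p ↔ x ∈ stack ∨
        (x ∈ getNeighbors p ∧ inBox lo hi x = true ∧ x ∉ lava ∧ x ∉ ext)) := by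
  obtain ⟨hl, hm⟩ := foldl_push
    (fun n => inBox lo hi n && !(PySem.Set.contains lava n) && !(ext.contains n))
    (getNeighbors p) stack
  constructor
  · exact le_of_le_of_eq hl (by simp [getNeighbors])
  · intro x
    rw [pushB, hm x]
    have e1 : ∀ (s : List C3) (y : C3), (PySem.Set.contains s y = false) ↔ y ∉ s := by
      intro s y
      rw [← Bool.not_eq_true, not_iff_not]
      exact PySem.Set.contains_iff s y
    have e2 : ∀ y : C3, (ext.contains y = false) ↔ y ∉ ext := by
      intro y
      rw [← Bool.not_eq_true, not_iff_not]
      exact Std.HashSet.mem_iff_contains.symm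
    simp [Bool.and_eq_true, Bool.not_eq_true', e1, e2, and_assoc]

lemma loopB_nil (lava : PySem.Set C3) (lo hi : C3) (fuel : Nat) (ext : Std.HashSet C3) :
    loopB lava lo hi (fuel + 1) ext [] = ext := rfl

lemma loopB_skip (lava : PySem.Set C3) (lo hi : C3) (fuel : Nat) (ext : Std.HashSet C3)
    (p : C3) (rest : List C3) (h : ext.contains p = true) :
    loopB lava lo hi (fuel + 1) ext (p :: rest) = loopB lava lo hi fuel ext rest := by
  simp only [loopB, h, if_true]

lemma loopB_visit (lava : PySem.Set C3) (lo hi : C3) (fuel : Nat) (ext : Std.HashSet C3)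
    (p : C3) (rest : List C3) (h : ext.contains p = false) :
    loopB lava lo hi (fuel + 1) ext (p :: rest)
      = loopB lava lo hi fuel (ext.insert p)
          (pushB lava lo hi (ext.insert p) rest p) := by
  simp only [loopB, h]
  simp

-- the DFS loop of B computes the reachable set (El is a ghost listing of ext's members)
lemma loopB_spec (lava : PySem.Set C3) (lo hi : C3)
    (h1 : lo.1 ≤ hi.1) (h2 : lo.2.1 ≤ hi.2.1) (h3 : lo.2.2 ≤ hi.2.2) :
    ∀ (fuel : Nat) (ext : Std.HashSet C3) (El : List C3) (stack : List C3),
    (∀ x, x ∈ ext ↔ x ∈ El) → El.Nodup →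
    (∀ c ∈ El, inBox lo hi c = true) →
    (∀ c ∈ stack, inBox lo hi c = true) →
    (∀ c ∈ El, Reach lava lo hi c) →
    (∀ c ∈ stack, Reach lava lo hi c) →
    (∀ c ∈ El, ∀ n ∈ getNeighbors c, Good lava lo hi n → n ∈ El ∨ n ∈ stack) →
    (lo ∈ El ∨ lo ∈ stack) →
    7 * boxFuel lo hi + stack.length + 1 ≤ fuel + 7 * El.length →
    (∀ x, x ∈ loopB lava lo hi fuel ext stack ↔ Reach lava lo hi x) := by
  intro fuel
  induction fuel with
  | zero =>
    intro ext El stack hcompat hN hbox hsbox hextR hstR hclosed hlo hfuel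
    exfalso
    have := length_le_boxFuel h1 h2 h3 hN hbox
    omega
  | succ fuel ih =>
    intro ext El stack hcompat hN hbox hsbox hextR hstR hclosed hlo hfuel
    cases stack with
    | nil =>
      rw [loopB_nil]
      intro x
      rw [hcompat x]
      refine ⟨fun h => hextR x h, reach_subset_closed ?_ ?_ x⟩
      · rcases hlo with h | h
        · exact h
        · cases h
      · intro c hc n hn hg
        rcases hclosed c hc n hn hg with h | h
        · exact h
        · cases h
    | cons p rest =>
      by_cases hp : ext.contains p = true
      · rw [loopB_skip lava lo hi fuel ext p rest hp]
        have hpE : p ∈ El := (hcompat p).1 (Std.HashSet.mem_iff_contains.2 hp)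
        apply ih ext El rest hcompat hN hbox
          (fun c hc => hsbox c (List.mem_cons_of_mem _ hc)) hextR
          (fun c hc => hstR c (List.mem_cons_of_mem _ hc)) ?_ ?_ ?_
        · intro c hc n hn hg
          rcases hclosed c hc n hn hg with h | h
          · exact Or.inl h
          · rcases List.mem_cons.1 h with rfl | h'
            · exact Or.inl hpE
            · exact Or.inr h'
        · rcases hlo with h | h
          · exact Or.inl h
          · rcases List.mem_cons.1 h with rfl | h'
            · exact Or.inl hpE
            · exact Or.inr h'
        · simp only [List.length_cons] at hfuel
          omega
      · rw [Bool.not_eq_true] at hp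
        have hpm : p ∉ ext := by
          rw [Std.HashSet.mem_iff_contains, hp]; exact fun h => by cases h
        have hpEl : p ∉ El := fun h => hpm ((hcompat p).2 h)
        rw [loopB_visit lava lo hi fuel ext p rest hp]
        have hmemins : ∀ x : C3, x ∈ ext.insert p ↔ x = p ∨ x ∈ ext := by
          intro x
          rw [Std.HashSet.mem_insert, beq_iff_eq]
          exact or_congr_left eq_comm
        obtain ⟨pl, pm⟩ := pushB_spec lava lo hi (ext.insert p) rest p
        have hpbox : inBox lo hi p = true := hsbox p (List.mem_cons_self ..)
        have hpR : Reach lava lo hi p := hstR p (List.mem_cons_self ..)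
        apply ih (ext.insert p) (El ++ [p]) (pushB lava lo hi (ext.insert p) rest p)
          ?_ ?_ ?_ ?_ ?_ ?_ ?_ ?_ ?_
        · intro x
          rw [hmemins x, List.mem_append, List.mem_singleton, hcompat x]
          tauto
        · exact hN.append (List.nodup_singleton _)
            (by rw [List.disjoint_right]; intro a ha; rcases List.mem_singleton.1 ha with rfl; exact hpEl)
        · intro c hc
          rcases List.mem_append.1 hc with h | h
          · exact hbox c h
          · rcases List.mem_singleton.1 h with rfl
            exact hpbox
        · intro c hc
          rcases (pm c).1 hc with h | h
          · exact hsbox c (List.mem_cons_of_mem _ h)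
          · exact h.2.1
        · intro c hc
          rcases List.mem_append.1 hc with h | h
          · exact hextR c h
          · rcases List.mem_singleton.1 h with rfl
            exact hpR
        · intro c hc
          rcases (pm c).1 hc with h | h
          · exact hstR c (List.mem_cons_of_mem _ h)
          · exact Reach.step hpR h.1 ⟨h.2.1, h.2.2.1⟩
        · intro c hc n hn hg
          rcases List.mem_append.1 hc with h | h
          · rcases hclosed c h n hn hg with h' | h'
            · exact Or.inl (List.mem_append.2 (Or.inl h'))
            · rcases List.mem_cons.1 h' with rfl | h''
              · exact Or.inl (List.mem_append.2 (Or.inr (List.mem_singleton.2 rfl)))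
              · exact Or.inr ((pm n).2 (Or.inl h''))
          · rcases List.mem_singleton.1 h with rfl
            by_cases hne : n ∈ ext.insert c
            · rcases (hmemins n).1 hne with rfl | h'
              · exact Or.inl (List.mem_append.2 (Or.inr (List.mem_singleton.2 rfl)))
              · exact Or.inl (List.mem_append.2 (Or.inl ((hcompat n).1 h')))
            · exact Or.inr ((pm n).2 (Or.inr ⟨hn, hg.1, hg.2, hne⟩))
        · rcases hlo with h | h
          · exact Or.inl (List.mem_append.2 (Or.inl h))
          · rcases List.mem_cons.1 h with rfl | h'
            · exact Or.inl (List.mem_append.2 (Or.inr (List.mem_singleton.2 rfl)))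
            · exact Or.inr ((pm lo).2 (Or.inl h'))
        · rw [List.length_append]
          simp only [List.length_cons] at hfuel
          simp only [List.length_singleton]
          omega

-- ===== counting lemmas =====

lemma getNeighbors_eq_shifts (c : C3) : getNeighbors c = dirs.map (fun d => shift d c) := by
  obtain ⟨x, y, z⟩ := c
  simp [getNeighbors, dirs, shift, sub_eq_add_neg]

lemma foldl_add_map (f : C3 → Int) (l : List C3) :
    ∀ i : Int, l.foldl (fun a c => a + f c) i = i + (l.map f).sum := by
  induction l with
  | nil => intro i; simp
  | cons c l ih => intro i; rw [List.foldl_cons, ih]; simp; ring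

lemma countFaces_eq (lava : PySem.Set C3) (ext : Std.HashSet C3) (El : List C3)
    (h : ∀ x, x ∈ ext ↔ x ∈ El) : countFaces lava ext = totalOf El lava := by
  unfold countFaces totalOf
  rw [foldl_add_map (fun c => (((getNeighbors c).filter (fun n => ext.contains n)).length : Int)) lava 0]
  rw [zero_add]
  congr 1
  apply List.map_congr_left
  intro c _
  congr 1
  rw [List.countP_eq_length_filter]
  congr 1
  apply List.filter_congr
  intro n _
  rw [Bool.eq_iff_iff, ← Std.HashSet.mem_iff_contains, PySem.Set.contains_iff]
  exact h n

lemma countP_eq_sum_map {α : Type} (p : α → Bool) (l : List α) :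
    l.countP p = (l.map (fun c => if p c then 1 else 0)).sum := by
  induction l with
  | nil => simp
  | cons c l ih => by_cases h : p c = true <;> simp [List.countP_cons, h, ih] <;> omega

lemma sum_countP_swap {α β : Type} (Q : β → α → Bool) (ds : List β) :
    ∀ B : List α,
    (B.map (fun c => ds.countP (fun d => Q d c))).sum
      = (ds.map (fun d => B.countP (Q d))).sum := by
  induction ds with
  | nil => intro B; simp
  | cons d ds ih =>
    intro B
    have e1 : ∀ c, (d :: ds).countP (fun d' => Q d' c)
        = (if Q d c then 1 else 0) + ds.countP (fun d' => Q d' c) := by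
      intro c; rw [List.countP_cons]; omega
    calc (B.map (fun c => (d :: ds).countP (fun d' => Q d' c))).sum
        = (B.map (fun c => (if Q d c then 1 else 0) + ds.countP (fun d' => Q d' c))).sum := by
          simp only [e1]
      _ = (B.map (fun c => if Q d c then 1 else 0)).sum
            + (B.map (fun c => ds.countP (fun d' => Q d' c))).sum := by
          rw [← List.sum_map_add]
      _ = B.countP (Q d) + (ds.map (fun d' => B.countP (Q d'))).sum := by
          rw [← countP_eq_sum_map, ih]
      _ = ((d :: ds).map (fun d' => B.countP (Q d'))).sum := by simp

lemma shift_dneg_shift (d x : C3) : shift (dneg d) (shift d x) = x := by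
  obtain ⟨a, b, c⟩ := d; obtain ⟨x1, x2, x3⟩ := x
  simp [shift, dneg]

lemma countP_shift (d : C3) (W L : List C3) (hW : W.Nodup) (hL : L.Nodup) :
    W.countP (fun w => decide (shift d w ∈ L))
      = L.countP (fun l => decide (shift (dneg d) l ∈ W)) := by
  rw [List.countP_eq_length_filter, List.countP_eq_length_filter]
  rw [← List.toFinset_card_of_nodup (hW.filter _), ← List.toFinset_card_of_nodup (hL.filter _)]
  apply Finset.card_bij' (fun w _ => shift d w) (fun l _ => shift (dneg d) l)
  · intro w hw
    simp only [List.mem_toFinset, List.mem_filter, decide_eq_true_eq] at hw ⊢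
    exact ⟨hw.2, by rw [shift_dneg_shift]; exact hw.1⟩
  · intro l hl
    simp only [List.mem_toFinset, List.mem_filter, decide_eq_true_eq] at hl ⊢
    refine ⟨hl.2, ?_⟩
    have : shift d (shift (dneg d) l) = l := by
      obtain ⟨a, b, c⟩ := d; obtain ⟨x1, x2, x3⟩ := l
      simp [shift, dneg]
    rw [this]; exact hl.1
  · intro w hw; exact shift_dneg_shift d w
  · intro l hl
    obtain ⟨a, b, c⟩ := d; obtain ⟨x1, x2, x3⟩ := l
    simp [shift, dneg]

lemma cast_sum_map (f : C3 → Nat) (l : List C3) :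
    (l.map (fun c => ((f c : Nat) : Int))).sum = (((l.map f).sum : Nat) : Int) := by
  induction l with
  | nil => simp
  | cons c l ih => simp [ih]

lemma contains_countP (A ns : List C3) :
    ns.countP (fun n => PySem.Set.contains A n) = ns.countP (fun n => decide (n ∈ A)) := by
  apply List.countP_congr
  intro n _
  rw [Bool.eq_iff_iff]
  simp [PySem.Set.contains_iff]

lemma natTotal_eq (A B : List C3) (hA : A.Nodup) (hB : B.Nodup) :
    (B.map (fun c => (getNeighbors c).countP (fun n => decide (n ∈ A)))).sum
      = (A.map (fun a => (getNeighbors a).countP (fun n => decide (n ∈ B)))).sum := by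
  have h1 : ∀ (X Y : List C3),
      (Y.map (fun c => (getNeighbors c).countP (fun n => decide (n ∈ X)))).sum
        = (dirs.map (fun d => Y.countP (fun c => decide (shift d c ∈ X)))).sum := by
    intro X Y
    rw [← sum_countP_swap (fun d c => decide (shift d c ∈ X)) dirs Y]
    congr 1
    apply List.map_congr_left
    intro c _
    rw [getNeighbors_eq_shifts, List.countP_map]
    rfl
  rw [h1, h1]
  have h2 : (dirs.map (fun d => B.countP (fun c => decide (shift d c ∈ A)))).sum
      = (dirs.map (fun d => A.countP (fun a => decide (shift (dneg d) a ∈ B)))).sum := by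
    congr 1
    apply List.map_congr_left
    intro d _
    exact countP_shift d B A hB hA
  rw [h2]
  simp only [dirs, dneg, List.map_cons, List.map_nil, List.sum_cons, List.sum_nil,
    neg_neg, neg_zero]
  ring

lemma totalOf_comm (A B : List C3) (hA : A.Nodup) (hB : B.Nodup) :
    totalOf A B = totalOf B A := by
  unfold totalOf
  have e : ∀ (X Y : List C3),
      (Y.map (fun c => (((getNeighbors c).countP (fun n => PySem.Set.contains X n) : Nat) : Int))).sum
        = (((Y.map (fun c => (getNeighbors c).countP (fun n => decide (n ∈ X)))).sum : Nat) : Int) := by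
    intro X Y
    rw [← cast_sum_map (fun c => (getNeighbors c).countP (fun n => decide (n ∈ X))) Y]
    congr 1
    apply List.map_congr_left
    intro c _
    rw [contains_countP]
  rw [e, e, natTotal_eq A B hA hB]

lemma pyMin_le {xs : List Int} (hne : xs ≠ []) : ∀ v ∈ xs, pyMinInt xs ≤ v := by
  cases h : PySem.List.min? xs (fun v => v) with
  | none => exact absurd ((PySem.List.min?_eq_none_iff xs _).1 h) hne
  | some m =>
    intro v hv
    have : pyMinInt xs = m := by simp [pyMinInt, h]
    rw [this]
    exact PySem.List.min?_isMin h v hv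

lemma pyMin_mem {xs : List Int} (hne : xs ≠ []) : pyMinInt xs ∈ xs := by
  cases h : PySem.List.min? xs (fun v => v) with
  | none => exact absurd ((PySem.List.min?_eq_none_iff xs _).1 h) hne
  | some m =>
    have : pyMinInt xs = m := by simp [pyMinInt, h]
    rw [this]
    exact PySem.List.min?_mem h

lemma le_pyMax {xs : List Int} (hne : xs ≠ []) : ∀ v ∈ xs, v ≤ pyMaxInt xs := by
  cases h : PySem.List.max? xs (fun v => v) with
  | none => exact absurd ((PySem.List.max?_eq_none_iff xs _).1 h) hne
  | some m =>
    intro v hv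
    have : pyMaxInt xs = m := by simp [pyMaxInt, h]
    rw [this]
    exact PySem.List.max?_isMax h v hv

theorem part2_spec : Claim_equal_part2 := by
  intro cubes _hdom hpre
  unfold Spec_part2
  cases cubes with
  | nil => exact absurd rfl hpre
  | cons q rest =>
    set cubes := q :: rest with hcubes
    have hne : cubes ≠ [] := by simp [hcubes]
    have hmapne : ∀ f : (Int × Int × Int) → Int, cubes.map f ≠ [] := by
      intro f; simp [hcubes]
    set lo := loBound cubes with hlo
    set hi := hiBound cubes with hhi
    set lava := PySem.Set.ofList cubes with hlava
    have hminmax : ∀ (f : (Int × Int × Int) → Int), pyMinInt (cubes.map f) ≤ pyMaxInt (cubes.map f) :=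
      fun f => le_pyMax (hmapne f) _ (pyMin_mem (hmapne f))
    have h1 : lo.1 ≤ hi.1 := by
      show pyMinInt (cubes.map (·.1)) - 1 ≤ pyMaxInt (cubes.map (·.1)) + 1
      have := hminmax (·.1); omega
    have h2 : lo.2.1 ≤ hi.2.1 := by
      show pyMinInt (cubes.map (·.2.1)) - 1 ≤ pyMaxInt (cubes.map (·.2.1)) + 1
      have := hminmax (·.2.1); omega
    have h3 : lo.2.2 ≤ hi.2.2 := by
      show pyMinInt (cubes.map (·.2.2)) - 1 ≤ pyMaxInt (cubes.map (·.2.2)) + 1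
      have := hminmax (·.2.2); omega
    have hlonot : lo ∉ cubes := by
      intro hmem
      have hx : lo.1 ∈ cubes.map (·.1) := List.mem_map_of_mem hmem
      have := pyMin_le (hmapne (·.1)) _ hx
      have hlo1 : lo.1 = pyMinInt (cubes.map (·.1)) - 1 := rfl
      omega
    have hlonotl : lo ∉ lava := fun h => hlonot ((PySem.Set.mem_ofList _ _).1 h)
    have hlobox : inBox lo hi lo = true := by
      simp only [inBox, decide_eq_true_eq]
      exact ⟨le_rfl, h1, le_rfl, h2, le_rfl, h3⟩
    have hlavaN : lava.Nodup := PySem.Set.nodup_ofList _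
    -- A's loop
    obtain ⟨W, hWN, hWmem, hWtot⟩ := loopA_spec lava lo hi h1 h2 h3
      (boxFuel lo hi + 1) ∅ [] [lo] 0 (par lo)
      (fun x => by simp [Std.HashSet.not_mem_empty])
      List.nodup_nil (List.nodup_singleton _)
      (by intro c hc; rcases List.mem_singleton.1 hc with rfl; exact Std.HashSet.not_mem_empty)
      (by intro c hc; rcases List.mem_singleton.1 hc with rfl; rfl)
      (by intro c hc; cases hc)
      (by intro c hc; rcases List.mem_singleton.1 hc with rfl; exact hlobox)
      (by intro c hc; cases hc)
      (by intro c hc; rcases List.mem_singleton.1 hc with rfl; exact Reach.base)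
      (by intro c hc; cases hc)
      (Or.inr (List.mem_singleton.2 rfl))
      (by simp [totalOf])
      (by simp)
    -- B's loop
    have hEmem := loopB_spec lava lo hi h1 h2 h3
      (7 * boxFuel lo hi + 2) ∅ [] [lo]
      (fun x => by simp [Std.HashSet.not_mem_empty])
      List.nodup_nil
      (by intro c hc; cases hc)
      (by intro c hc; rcases List.mem_singleton.1 hc with rfl; exact hlobox)
      (by intro c hc; cases hc)
      (by intro c hc; rcases List.mem_singleton.1 hc with rfl; exact Reach.base)
      (by intro c hc; cases hc)
      (Or.inr (List.mem_singleton.2 rfl))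
      (by simp)
    have hA : part2 cubes = totalOf lava W := hWtot
    have hB : part2_alt cubes
        = countFaces lava (loopB lava lo hi (7 * boxFuel lo hi + 2) ∅ [lo]) := rfl
    rw [hA, hB, countFaces_eq lava _ W (fun x => (hEmem x).trans (hWmem x).symm),
      totalOf_comm lava W hlavaN hWN]
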